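-- pv_equiv track=rewrite | github.com/faludiz/DiMap_Pad_to_Job | dimappad2job.py | get_station_data
-- ===== SOURCE A (Python) =====
-- def get_station_data(info):
--     """Extract station information from the given data."""
--     stn = []
--     name = ""
--     hi = ""
--     for i in range(len(info)):
--         sdata = info[i].split(':')
--         if len(sdata) > 1:
--             if sdata[0] == "stationName":
--                 name = sdata[1]
--             if sdata[0] == "hi":
--                 hi = sdata[1]
--     stn.append(name)  #0
--     stn.append(hi)  #1
--     return stn
-- ===== SOURCE B (Python) =====
-- def get_station_data(info):
--     """Extract station information from the given data."""
--     def last_value(field):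
--         # scan back-to-front: the last matching line in A is the first one here
--         for line in reversed(info):
--             parts = line.split(':')
--             if len(parts) > 1 and parts[0] == field:
--                 return parts[1]
--         return ""
--     return [last_value("stationName"), last_value("hi")]
-- ===== Notes on version B (the rewrite author's own statement) =====
-- stated objective: alternative
-- what changed: Replaces the index-loop with mutable name/hi accumulators by a per-field back-to-front scan with early return (last occurrence wins becomes first match on the reversed list).
import Mathlib
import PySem

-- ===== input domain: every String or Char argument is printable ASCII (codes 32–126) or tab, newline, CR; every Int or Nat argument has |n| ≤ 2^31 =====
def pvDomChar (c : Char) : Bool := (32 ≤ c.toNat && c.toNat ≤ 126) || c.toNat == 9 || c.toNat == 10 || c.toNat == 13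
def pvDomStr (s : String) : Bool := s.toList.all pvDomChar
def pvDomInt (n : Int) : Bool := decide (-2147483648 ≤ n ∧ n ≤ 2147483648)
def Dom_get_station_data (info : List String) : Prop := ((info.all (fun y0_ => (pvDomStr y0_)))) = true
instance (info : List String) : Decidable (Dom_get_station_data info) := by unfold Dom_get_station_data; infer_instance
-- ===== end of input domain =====

-- B replaces A's forward index-loop with two mutable accumulators by a per-field
-- back-to-front scan with early exit (alternative decomposition; same return value).

-- ===== PORT A =====
-- index loop over range(len(info)); sdata[0]/sdata[1] via pyGetD (always in range under the len>1 guard, so exact)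
def get_station_data (info : List String) : List String :=
  let p := (PySem.List.pyRange 0 (PySem.List.len info) 1).foldl
    (fun (st : String × String) i =>
      let sdata := (PySem.Str.split? (PySem.List.pyGetD info i "") ":").getD []
      if sdata.length > 1 then
        let name := if PySem.List.pyGetD sdata 0 "" = "stationName" then PySem.List.pyGetD sdata 1 "" else st.1
        let hi := if PySem.List.pyGetD sdata 0 "" = "hi" then PySem.List.pyGetD sdata 1 "" else st.2
        (name, hi)
      else st) ("", "")
  [p.1, p.2]

-- ===== PORT B =====
-- last_value(field): scan the reversed list, return the first match, "" if none
def gsdLastValue (field : String) : List String → String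
  | [] => ""
  | l :: ls =>
    let parts := (PySem.Str.split? l ":").getD []
    if parts.length > 1 ∧ PySem.List.pyGetD parts 0 "" = field then PySem.List.pyGetD parts 1 ""
    else gsdLastValue field ls

def get_station_data_alt (info : List String) : List String :=
  [gsdLastValue "stationName" info.reverse, gsdLastValue "hi" info.reverse]

-- ===== PRECONDITION & SPEC =====
def Spec_get_station_data (info : List String) (out : List String) : Prop := out = get_station_data_alt info
instance (info : List String) (out : List String) : Decidable (Spec_get_station_data info out) := by unfold Spec_get_station_data; infer_instance

-- ===== CLAIM (what is proved, stated in full; the proofs are below) =====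
def Claim_equal_get_station_data : Prop := ∀ (info : List String), Dom_get_station_data info → Spec_get_station_data info (get_station_data info)

-- ===== LEMMAS AND PROOFS =====

-- A's loop body, as a function on accumulator pairs
def gsdStep (st : String × String) (line : String) : String × String :=
  let sdata := (PySem.Str.split? line ":").getD []
  if sdata.length > 1 then
    (if PySem.List.pyGetD sdata 0 "" = "stationName" then PySem.List.pyGetD sdata 1 "" else st.1,
     if PySem.List.pyGetD sdata 0 "" = "hi" then PySem.List.pyGetD sdata 1 "" else st.2)
  else st

-- back-to-front scan with an explicit fallback (generalises gsdLastValue for the induction)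
def gsdLV (field : String) (d : String) : List String → String
  | [] => d
  | l :: ls =>
    let parts := (PySem.Str.split? l ":").getD []
    if parts.length > 1 ∧ PySem.List.pyGetD parts 0 "" = field then PySem.List.pyGetD parts 1 ""
    else gsdLV field d ls

theorem gsdLV_empty (field : String) (l : List String) : gsdLV field "" l = gsdLastValue field l := by
  induction l with
  | nil => rfl
  | cons y ys ih => simp only [gsdLV, gsdLastValue]; split <;> simp [ih]

-- appending a line at the end of the scanned (reversed) list only changes the fallback
theorem gsdLV_append (field : String) (l : List String) (x d : String) :
    gsdLV field d (l ++ [x]) =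
      gsdLV field
        (let parts := (PySem.Str.split? x ":").getD []
         if parts.length > 1 ∧ PySem.List.pyGetD parts 0 "" = field then PySem.List.pyGetD parts 1 "" else d)
        l := by
  induction l with
  | nil => rfl
  | cons y ys ih =>
      simp only [List.cons_append, gsdLV]
      split
      · rfl
      · exact ih

-- loop invariant: A's fold from (n, h) computes the two back-to-front scans with fallbacks n, h
theorem gsd_invariant (info : List String) : ∀ n h : String,
    info.foldl gsdStep (n, h) =
      (gsdLV "stationName" n info.reverse, gsdLV "hi" h info.reverse) := by
  induction info with
  | nil => intro n h; rfl
  | cons x xs ih =>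
      intro n h
      simp only [List.foldl_cons, List.reverse_cons, gsdLV_append]
      have hx : gsdStep (n, h) x =
          ((let parts := (PySem.Str.split? x ":").getD []
            if parts.length > 1 ∧ PySem.List.pyGetD parts 0 "" = "stationName" then PySem.List.pyGetD parts 1 "" else n),
           (let parts := (PySem.Str.split? x ":").getD []
            if parts.length > 1 ∧ PySem.List.pyGetD parts 0 "" = "hi" then PySem.List.pyGetD parts 1 "" else h)) := by
        simp only [gsdStep]
        by_cases hlen : ((PySem.Str.split? x ":").getD []).length > 1
        · simp [hlen]
        · simp [hlen]
      rw [hx] at *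
      exact ih _ _

-- ===== VERDICT (by name: the statement is the Claim_ definition above) =====
theorem get_station_data_spec : Claim_equal_get_station_data := by
  intro info _
  unfold Spec_get_station_data get_station_data get_station_data_alt
  show [(List.foldl (fun st i => gsdStep st (PySem.List.pyGetD info i "")) ("", "")
          (PySem.List.pyRange 0 (PySem.List.len info) 1)).1,
        (List.foldl (fun st i => gsdStep st (PySem.List.pyGetD info i "")) ("", "")
          (PySem.List.pyRange 0 (PySem.List.len info) 1)).2] = _
  rw [PySem.List.foldl_pyRange_zero_pyGetD, gsd_invariant]
  simp [gsdLV_empty]
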